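-- pv_equiv track=rewrite | github.com/dhungelsumit/hello-world | NumbeOfCharacter.py | calculate
-- ===== SOURCE A (Python) =====
-- def calculate(a,b,count,i):
--     if i<len(a):
--         if a[i]==b:
--             count=count+1
--             i=i+1
--         else:
--             i=i+1
--         return calculate(a,b,count,i)
--     else:
--
--         return count
-- ===== SOURCE B (Python) =====
-- def calculate(a, b, count, i):
--     # iterative loop over the same index sequence the recursion visits
--     for j in range(i, len(a)):
--         if a[j] == b:
--             count += 1
--     return count
-- ===== Notes on version B (the rewrite author's own statement) =====
-- stated objective: simpler
-- what changed: Replaces the linear tail recursion (one call frame per character) with a single explicit for-loop over range(i, len(a)) accumulating count.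
import Mathlib
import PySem

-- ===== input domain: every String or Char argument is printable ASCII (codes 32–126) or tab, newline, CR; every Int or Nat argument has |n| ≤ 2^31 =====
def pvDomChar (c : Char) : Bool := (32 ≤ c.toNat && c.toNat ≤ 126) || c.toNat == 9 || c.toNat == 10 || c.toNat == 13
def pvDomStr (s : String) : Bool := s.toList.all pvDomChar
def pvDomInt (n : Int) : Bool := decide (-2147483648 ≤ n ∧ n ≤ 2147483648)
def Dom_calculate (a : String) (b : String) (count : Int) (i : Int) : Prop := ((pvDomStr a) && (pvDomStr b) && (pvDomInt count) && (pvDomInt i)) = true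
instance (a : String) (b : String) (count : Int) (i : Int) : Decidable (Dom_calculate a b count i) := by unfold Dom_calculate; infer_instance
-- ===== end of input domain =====

-- B replaces A's linear tail recursion with one explicit loop over range(i, len(a)); simpler, same O(n) cost.


-- ===== PORT A =====
-- literal port of A's tail recursion; the 'none' arm is the IndexError case, excluded by Pre_
def calculate (a : String) (b : String) (count : Int) (i : Int) : Int :=
  if _h : i < PySem.Str.len a then
    match PySem.Str.pyGet? a i with
    | some c => if ([c] : List Char) = b.toList
                then calculate a b (count + 1) (i + 1)
                else calculate a b count (i + 1)
    | none => count
  else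
    count
termination_by (PySem.Str.len a - i).toNat
decreasing_by all_goals (simp [PySem.Str.len_eq] at *; omega)

-- ===== PORT B =====
-- port of Source B: fold over range(i, len(a)); the 'none' arm is the IndexError case, excluded by Pre_
def calculate_alt (a : String) (b : String) (count : Int) (i : Int) : Int :=
  (PySem.List.pyRange i (PySem.Str.len a) 1).foldl
    (fun acc j =>
      match PySem.Str.pyGet? a j with
      | some c => if ([c] : List Char) = b.toList then acc + 1 else acc
      | none => acc)
    count

-- ===== PRECONDITION & SPEC =====
-- Pre_ excludes only inputs where BOTH Pythons raise IndexError: i below -len(a) while i < len(a)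
def Pre_calculate (a : String) (b : String) (count : Int) (i : Int) : Prop :=
  -(PySem.Str.len a) ≤ i
instance (a : String) (b : String) (count : Int) (i : Int) : Decidable (Pre_calculate a b count i) := by unfold Pre_calculate; infer_instance
def pvWitness_calculate : String × String × Int × Int := ("abca", "a", 0, -2)

def Spec_calculate (a : String) (b : String) (count : Int) (i : Int) (out : Int) : Prop := out = calculate_alt a b count i
instance (a : String) (b : String) (count : Int) (i : Int) (out : Int) : Decidable (Spec_calculate a b count i out) := by unfold Spec_calculate; infer_instance

-- ===== CLAIM (what is proved, stated in full; the proofs are below) =====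
def Claim_equal_calculate : Prop := ∀ (a : String) (b : String) (count : Int) (i : Int), Dom_calculate a b count i → Pre_calculate a b count i → Spec_calculate a b count i (calculate a b count i)

-- ===== LEMMAS AND PROOFS =====

theorem calculate_eq_alt (a : String) (b : String) :
    ∀ (n : Nat) (count i : Int), -(PySem.Str.len a) ≤ i → (PySem.Str.len a - i).toNat = n →
      calculate a b count i = calculate_alt a b count i := by
  intro n
  induction n with
  | zero =>
    intro count i _hlo hn
    have hge : PySem.Str.len a ≤ i := by omega
    rw [calculate, calculate_alt, dif_neg (not_lt.mpr hge),
        PySem.List.pyRange_one_eq_nil hge, List.foldl_nil]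
  | succ m ih =>
    intro count i hlo hn
    have hlt : i < PySem.Str.len a := by omega
    have hrange : PySem.Raise.InRange a.toList.length i := by
      constructor <;> simp [PySem.Str.len_eq] at * <;> omega
    have hsome : ∃ c, PySem.Str.pyGet? a i = some c := by
      rcases h : PySem.Str.pyGet? a i with _ | c
      · exfalso
        have := (PySem.List.pyGet?_eq_none_iff (xs := a.toList) (i := i)).mp
          (by simpa using h)
        exact this hrange
      · exact ⟨c, rfl⟩
    rcases hsome with ⟨c, hc⟩
    rw [calculate, calculate_alt, dif_pos hlt,
        PySem.List.pyRange_one_cons hlt, List.foldl_cons]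
    simp only [hc]
    split
    · rw [ih (count + 1) (i + 1) (by omega) (by omega), calculate_alt]
    · rw [ih count (i + 1) (by omega) (by omega), calculate_alt]

-- ===== VERDICT (by name: the statement is the Claim_ definition above) =====
theorem calculate_spec : Claim_equal_calculate := by
  intro a b count i _hdom hpre
  exact calculate_eq_alt a b (PySem.Str.len a - i).toNat count i hpre rfl
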